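-- pv_equiv track=rewrite | github.com/FloatingArrayDesign/FAModel | famodel/irma/action.py | incrementer
-- ===== SOURCE A (Python) =====
-- def incrementer(text):
--     '''
--     Increments the last integer found in a string.
--
--     Inputs
--     ------
--     `text` : `str`
--         The input string to increment.
--
--     Returns
--     -------
--     `str`
--         The incremented string.
--     '''
--     split_text = text.split()[::-1]
--     for ind, spl in enumerate(split_text):
--         try:
--             split_text[ind] = str(int(spl) + 1)
--             break
--         except ValueError:
--             continue
--     return " ".join(split_text[::-1])
-- ===== SOURCE B (Python) =====
-- def incrementer(text):
--     tokens = text.split()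
--     last = None  # (index, parsed value) of the last int-valued token
--     for i, tok in enumerate(tokens):
--         try:
--             last = (i, int(tok))
--         except ValueError:
--             continue
--     if last is not None:
--         i, val = last
--         tokens[i] = str(val + 1)
--     return " ".join(tokens)
-- ===== Notes on version B (the rewrite author's own statement) =====
-- stated objective: simpler
-- what changed: B replaces A's reverse-copy + in-place mutation + break + second reverse with one forward pass over the tokens that remembers the last int-parseable token (index and parsed value), then rebuilds the list once; no list reversals at all.
import Mathlib
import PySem

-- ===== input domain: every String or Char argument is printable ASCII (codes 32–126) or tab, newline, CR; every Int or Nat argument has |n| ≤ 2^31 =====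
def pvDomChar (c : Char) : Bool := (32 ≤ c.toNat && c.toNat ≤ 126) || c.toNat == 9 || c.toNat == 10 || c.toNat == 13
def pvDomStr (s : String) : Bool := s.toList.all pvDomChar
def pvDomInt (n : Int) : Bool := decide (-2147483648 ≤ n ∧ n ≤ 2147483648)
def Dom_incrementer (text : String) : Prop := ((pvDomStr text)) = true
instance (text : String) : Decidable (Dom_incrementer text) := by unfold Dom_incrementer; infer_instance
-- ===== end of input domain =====

-- B: one forward pass remembering the last int-parseable token instead of A's reverse/mutate/break/reverse; simpler, same cost.


-- ===== PORT A =====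
-- A's loop: walk the reversed token list, replace the FIRST int-parseable token, break.
def pvIncFirst : List String → List String
  | [] => []
  | t :: rest =>
    match PySem.Int.ofStr? t with
    | some n => PySem.Int.toStr (n + 1) :: rest
    | none => t :: pvIncFirst rest

def incrementer (text : String) : String :=
  let split_text := (PySem.Str.split₀ text).reverse
  PySem.Str.join " " (pvIncFirst split_text).reverse

-- ===== PORT B =====
-- B's loop: forward fold over enumerate, remembering (index, parsed value) of the last int token.
def pvLastInt (tokens : List String) : Option (Int × Int) :=
  (PySem.List.enumerate tokens 0).foldl
    (fun last p =>
      match PySem.Int.ofStr? p.2 with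
      | some v => some (p.1, v)
      | none => last) none

def incrementer_alt (text : String) : String :=
  let tokens := PySem.Str.split₀ text
  match pvLastInt tokens with
  | some (i, v) => PySem.Str.join " " (tokens.set i.toNat (PySem.Int.toStr (v + 1)))
  | none => PySem.Str.join " " tokens

-- ===== PRECONDITION & SPEC =====
def Spec_incrementer (text : String) (out : String) : Prop := out = incrementer_alt text
instance (text : String) (out : String) : Decidable (Spec_incrementer text out) := by unfold Spec_incrementer; infer_instance

-- ===== CLAIM (what is proved, stated in full; the proofs are below) =====
def Claim_equal_incrementer : Prop := ∀ (text : String), Dom_incrementer text → Spec_incrementer text (incrementer text)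

-- ===== LEMMAS AND PROOFS =====

theorem pvLastInt_append_singleton (ts : List String) (a : String) :
    pvLastInt (ts ++ [a]) =
      match PySem.Int.ofStr? a with
      | some v => some ((ts.length : Int), v)
      | none => pvLastInt ts := by
  unfold pvLastInt
  rw [PySem.List.enumerate_append]
  simp [PySem.List.enumerate]

theorem pvLastInt_bound (ts : List String) (i v : Int) (h : pvLastInt ts = some (i, v)) :
    0 ≤ i ∧ i.toNat < ts.length := by
  induction ts using List.reverseRecOn with
  | nil => simp [pvLastInt, PySem.List.enumerate] at h
  | append_singleton l a ih =>
    rw [pvLastInt_append_singleton] at h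
    cases hp : PySem.Int.ofStr? a with
    | some v' =>
      rw [hp] at h
      simp at h
      obtain ⟨h1, h2⟩ := h
      subst h1
      simp
    | none =>
      rw [hp] at h
      have := ih h
      simp
      omega

theorem pvIncFirst_reverse (ts : List String) :
    (pvIncFirst ts.reverse).reverse =
      match pvLastInt ts with
      | some (i, v) => ts.set i.toNat (PySem.Int.toStr (v + 1))
      | none => ts := by
  induction ts using List.reverseRecOn with
  | nil => simp [pvIncFirst, pvLastInt, PySem.List.enumerate]
  | append_singleton l a ih =>
    rw [pvLastInt_append_singleton]
    cases hp : PySem.Int.ofStr? a with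
    | some v =>
      simp only [List.reverse_append, List.reverse_cons, List.reverse_nil, List.nil_append,
        List.cons_append, pvIncFirst, hp]
      simp
    | none =>
      simp only [List.reverse_append, List.reverse_cons, List.reverse_nil, List.nil_append,
        List.cons_append, pvIncFirst, hp]
      rw [ih]
      cases hl : pvLastInt l with
      | none => simp
      | some p =>
        obtain ⟨i, v⟩ := p
        have hb := pvLastInt_bound l i v hl
        simp [hb.2]

-- ===== VERDICT (by name: the statement is the Claim_ definition above) =====
theorem incrementer_spec : Claim_equal_incrementer := by
  intro text _
  simp only [Spec_incrementer, incrementer, incrementer_alt, pvIncFirst_reverse]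
  cases h : pvLastInt (PySem.Str.split₀ text) with
  | none => rfl
  | some p => obtain ⟨i, v⟩ := p; rfl
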